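-- pv_equiv track=rewrite | github.com/MolEvolEpid/wavess_manuscript | fit_empirical/simulations/agents.py | prep_ref_conserved
-- ===== SOURCE A (Python) =====
-- def prep_ref_conserved(founder_viruses, reference_sequence, conserved_sites):
--     founder_virus_sequences = list(founder_viruses.values())
--     assert len(founder_virus_sequences[0]) == len(reference_sequence)
--     # remove any conserved sites that are variable in the founder sequence compared to the reference
--     diff_sites = set({})
--     for f in founder_virus_sequences:
--         diff_sites.update({i for i, (left, right) in enumerate(
--             zip(reference_sequence, f)) if left != right})
--     [conserved_sites.pop(x, None) for x in diff_sites]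
--     # mask conserved sites so they aren't included in replicative
--     # fitness computation
--     reference_sequence = "".join(
--         [x if i not in conserved_sites else "-" for i, x in enumerate(reference_sequence)])
--     # number of sites to be compared for replicative fitness
--     # len_ref_compare = len([1 for x in range(len(reference_sequence)) if reference_sequence[x] in ["A", "T", "C", "G"]])
--     return reference_sequence, conserved_sites  # , len_ref_compare
-- ===== SOURCE B (Python) =====
-- def prep_ref_conserved(founder_viruses, reference_sequence, conserved_sites):
--     founder_virus_sequences = list(founder_viruses.values())
--     assert len(founder_virus_sequences[0]) == len(reference_sequence)
--     masked = []
--     for i in range(len(reference_sequence)):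
--         if any(i < len(f) and f[i] != reference_sequence[i] for f in founder_virus_sequences):
--             conserved_sites.pop(i, None)
--         masked.append("-" if i in conserved_sites else reference_sequence[i])
--     return "".join(masked), conserved_sites
-- ===== Notes on version B (the rewrite author's own statement) =====
-- stated objective: simpler
-- what changed: One pass over positions replaces A's three passes (a per-founder diff-site set build, a pop pass over the set, and a masking comprehension): each position decides its own pop and output character directly, with no intermediate diff_sites set.
import Mathlib
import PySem

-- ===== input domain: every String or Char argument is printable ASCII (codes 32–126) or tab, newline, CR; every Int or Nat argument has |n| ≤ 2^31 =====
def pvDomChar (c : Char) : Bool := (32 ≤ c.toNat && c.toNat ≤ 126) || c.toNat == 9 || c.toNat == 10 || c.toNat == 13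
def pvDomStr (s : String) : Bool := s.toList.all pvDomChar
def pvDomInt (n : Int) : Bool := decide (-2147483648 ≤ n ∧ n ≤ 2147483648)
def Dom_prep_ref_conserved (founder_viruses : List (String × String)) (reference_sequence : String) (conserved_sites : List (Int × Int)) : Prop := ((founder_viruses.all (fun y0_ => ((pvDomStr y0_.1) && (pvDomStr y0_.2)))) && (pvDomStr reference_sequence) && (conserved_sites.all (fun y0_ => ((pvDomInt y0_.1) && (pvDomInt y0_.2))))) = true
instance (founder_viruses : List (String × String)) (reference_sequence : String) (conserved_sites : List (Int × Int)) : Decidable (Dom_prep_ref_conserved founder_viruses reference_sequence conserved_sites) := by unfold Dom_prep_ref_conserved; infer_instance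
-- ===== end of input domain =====

-- B makes one pass over positions instead of A's three passes (diff-site set build, pop pass, masking
-- comprehension); same return value. Both Pythons pop from conserved_sites in place (same final dict);
-- the equivalence proved here is about the return value.

-- ===== PORT A =====
-- literal transliteration of A; the Python assert (raises unless founder_viruses is nonempty and its
-- first value has the reference's length) is excluded by Pre_ below.
def prep_ref_conserved (founder_viruses : List (String × String)) (reference_sequence : String) (conserved_sites : List (Int × Int)) : String × (List (Int × Int)) :=
  let founder_virus_sequences := (PySem.Dict.mk founder_viruses).values
  let diff_sites : PySem.Set Int := founder_virus_sequences.foldl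
    (fun s f => PySem.Set.update s (PySem.Set.ofList
      (((PySem.List.enumerate (List.zip reference_sequence.toList f.toList) 0).filter
          (fun p => p.2.1 != p.2.2)).map (fun p => p.1))))
    PySem.Set.empty
  let cs1 := diff_sites.foldl (fun d x => d.erase x) (PySem.Dict.mk conserved_sites)
  -- "".join over the per-character comprehension, built as List Char (each piece is one character)
  let ref2 := String.mk ((PySem.List.enumerate reference_sequence.toList 0).map
    (fun p => if cs1.contains p.1 then '-' else p.2))
  (ref2, cs1.items)

-- ===== PORT B =====
def prep_ref_conserved_alt (founder_viruses : List (String × String)) (reference_sequence : String) (conserved_sites : List (Int × Int)) : String × (List (Int × Int)) :=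
  let founder_virus_sequences := (PySem.Dict.mk founder_viruses).values
  let r := (List.range reference_sequence.toList.length).foldl
    (fun (st : PySem.Dict Int Int × List Char) i =>
      let d := if founder_virus_sequences.any
                 (fun f => decide (i < f.toList.length) && (f.toList[i]? != reference_sequence.toList[i]?))
               then st.1.erase (i : Int) else st.1
      (d, st.2 ++ [if d.contains (i : Int) then '-' else reference_sequence.toList.getD i ' ']))
    (PySem.Dict.mk conserved_sites, [])
  (String.mk r.2, r.1.items)

-- ===== PRECONDITION & SPEC =====
-- Pre_ excludes exactly the inputs where the Python raises: an empty founder dict (IndexError) and a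
-- first founder sequence whose length differs from the reference (AssertionError).
def Pre_prep_ref_conserved (founder_viruses : List (String × String)) (reference_sequence : String) (conserved_sites : List (Int × Int)) : Prop :=
  founder_viruses ≠ [] ∧ (founder_viruses.headI.2).toList.length = reference_sequence.toList.length
instance (founder_viruses : List (String × String)) (reference_sequence : String) (conserved_sites : List (Int × Int)) : Decidable (Pre_prep_ref_conserved founder_viruses reference_sequence conserved_sites) := by unfold Pre_prep_ref_conserved; infer_instance
def pvWitness_prep_ref_conserved : (List (String × String)) × String × (List (Int × Int)) := ([("a", "AC")], "AG", [((0 : Int), (1 : Int))])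

def Spec_prep_ref_conserved (founder_viruses : List (String × String)) (reference_sequence : String) (conserved_sites : List (Int × Int)) (out : String × (List (Int × Int))) : Prop := out = prep_ref_conserved_alt founder_viruses reference_sequence conserved_sites
instance (founder_viruses : List (String × String)) (reference_sequence : String) (conserved_sites : List (Int × Int)) (out : String × (List (Int × Int))) : Decidable (Spec_prep_ref_conserved founder_viruses reference_sequence conserved_sites out) := by unfold Spec_prep_ref_conserved; infer_instance

-- ===== CLAIM (what is proved, stated in full; the proofs are below) =====
def Claim_equal_prep_ref_conserved : Prop := ∀ (founder_viruses : List (String × String)) (reference_sequence : String) (conserved_sites : List (Int × Int)), Dom_prep_ref_conserved founder_viruses reference_sequence conserved_sites → Pre_prep_ref_conserved founder_viruses reference_sequence conserved_sites → Spec_prep_ref_conserved founder_viruses reference_sequence conserved_sites (prep_ref_conserved founder_viruses reference_sequence conserved_sites)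

-- ===== LEMMAS AND PROOFS =====

-- "position i differs between the reference and some founder" (B's per-position test)
def pvBad (seqs : List String) (rl : List Char) (i : Nat) : Bool :=
  seqs.any (fun f => decide (i < f.toList.length) && (f.toList[i]? != rl[i]?))

lemma pv_foldl_erase_items (l : List Int) (d : PySem.Dict Int Int) :
    (l.foldl (fun d x => d.erase x) d).items
      = d.items.filter (fun p => l.all (fun x => p.1 != x)) := by
  induction l generalizing d with
  | nil => simp
  | cons x l ih =>
    rw [List.foldl_cons, ih]
    simp only [PySem.Dict.erase, List.filter_filter]
    exact List.filter_congr (fun p _ => by simp [bne, Bool.and_comm])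

lemma pv_mem_foldl_update (seqs : List String) (comp : String → List Int) (s : PySem.Set Int) (x : Int) :
    x ∈ seqs.foldl (fun s f => PySem.Set.update s (comp f)) s ↔ x ∈ s ∨ ∃ f ∈ seqs, x ∈ comp f := by
  induction seqs generalizing s with
  | nil => simp
  | cons f seqs ih =>
    rw [List.foldl_cons, ih]
    simp [PySem.Set.mem_update, or_assoc]

lemma pv_mem_diff_sites (seqs : List String) (rl : List Char) (x : Int) :
    x ∈ seqs.foldl
      (fun s f => PySem.Set.update s (PySem.Set.ofList
        (((PySem.List.enumerate (List.zip rl f.toList) 0).filter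
            (fun p => p.2.1 != p.2.2)).map (fun p => p.1))))
      PySem.Set.empty
    ↔ ∃ i : Nat, i < rl.length ∧ pvBad seqs rl i ∧ x = (i : Int) := by
  rw [pv_mem_foldl_update]
  simp only [PySem.Set.empty, List.not_mem_nil, false_or, PySem.Set.mem_ofList, List.mem_map,
    List.mem_filter, PySem.List.mem_enumerate_iff, pvBad, List.any_eq_true]
  constructor
  · rintro ⟨f, hf, p, ⟨⟨k, hk, rfl⟩, hne⟩, rfl⟩
    have hk' := hk
    rw [List.length_zip] at hk'
    have h1 : k < rl.length := lt_of_lt_of_le hk' (min_le_left _ _)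
    have h2 : k < f.toList.length := lt_of_lt_of_le hk' (min_le_right _ _)
    refine ⟨k, h1, ⟨f, hf, ?_⟩, by push_cast; ring⟩
    rw [List.getElem_zip] at hne
    simp only [h2, decide_true, Bool.true_and, List.getElem?_eq_getElem, h1]
    have hne' : ¬rl[k] = f.toList[k] := by simpa [bne] using hne
    simpa [bne] using (Ne.symm hne')
  · rintro ⟨i, hi, ⟨f, hf, hcond⟩, rfl⟩
    simp only [Bool.and_eq_true] at hcond
    obtain ⟨hlt, hne⟩ := hcond
    have h2 : i < f.toList.length := of_decide_eq_true hlt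
    have hz : i < (List.zip rl f.toList).length := by
      rw [List.length_zip]; omega
    refine ⟨f, hf, ((0 : Int) + i, (List.zip rl f.toList)[i]), ⟨⟨i, hz, rfl⟩, ?_⟩, by push_cast; ring⟩
    rw [List.getElem_zip]
    simp only [List.getElem?_eq_getElem, hi, h2] at hne
    have hne' : ¬f.toList[i] = rl[i] := by simpa [bne] using hne
    simpa [bne] using (Ne.symm hne')

lemma pv_any_key (xs : List (Int × Int)) (k : Int) (c : Int → Bool) :
    xs.any (fun p => c p.1 && p.1 == k) = (xs.any (fun p => p.1 == k) && c k) := by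
  induction xs with
  | nil => simp
  | cons p xs ih =>
    by_cases h : p.1 = k
    · subst h; cases hc : c p.1 <;> simp [hc, ih]
    · have hb : (p.1 == k) = false := by simp [h]
      simp [hb, ih]

lemma pv_contains_foldl_erase (l : List Int) (d : PySem.Dict Int Int) (k : Int) :
    (l.foldl (fun d x => d.erase x) d).contains k
      = (d.contains k && l.all (fun x => k != x)) := by
  simp only [PySem.Dict.contains, pv_foldl_erase_items, List.any_filter]
  exact pv_any_key d.items k (fun y => l.all (fun x => y != x))

lemma pv_foldl_eraseN_items (l : List Nat) (d : PySem.Dict Int Int) :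
    (l.foldl (fun d (x : Nat) => d.erase (x : Int)) d).items
      = d.items.filter (fun p => l.all (fun x => p.1 != (x : Int))) := by
  induction l generalizing d with
  | nil => simp
  | cons x l ih =>
    rw [List.foldl_cons, ih]
    simp only [PySem.Dict.erase, List.filter_filter]
    exact List.filter_congr (fun p _ => by simp [bne, Bool.and_comm])

lemma pv_contains_foldl_eraseN (l : List Nat) (d : PySem.Dict Int Int) (k : Int) :
    (l.foldl (fun d (x : Nat) => d.erase (x : Int)) d).contains k
      = (d.contains k && l.all (fun x => k != (x : Int))) := by
  simp only [PySem.Dict.contains, pv_foldl_eraseN_items, List.any_filter]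
  exact pv_any_key d.items k (fun y => l.all (fun x => y != (x : Int)))

lemma pv_contains_erase_self (d : PySem.Dict Int Int) (k : Int) :
    (d.erase k).contains k = false := by
  simp [PySem.Dict.erase, PySem.Dict.contains, List.any_filter]

lemma pv_B_fst (cs0 : PySem.Dict Int Int) (seqs : List String) (rl : List Char) (n : Nat) :
    ((List.range n).foldl
      (fun (st : PySem.Dict Int Int × List Char) i =>
        let d := if pvBad seqs rl i then st.1.erase (i : Int) else st.1
        (d, st.2 ++ [if d.contains (i : Int) then '-' else rl.getD i ' ']))
      (cs0, [])).1
    = ((List.range n).filter (pvBad seqs rl)).foldl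
        (fun d (x : Nat) => d.erase (x : Int)) cs0 := by
  induction n with
  | zero => simp
  | succ n ih =>
    rw [List.range_succ, List.foldl_append, List.filter_append, List.foldl_append]
    have hstep : ∀ (P : PySem.Dict Int Int × List Char),
        ([n].foldl
          (fun (st : PySem.Dict Int Int × List Char) i =>
            let d := if pvBad seqs rl i then st.1.erase (i : Int) else st.1
            (d, st.2 ++ [if d.contains (i : Int) then '-' else rl.getD i ' '])) P).1
        = if pvBad seqs rl n then P.1.erase (n : Int) else P.1 := fun P => rfl
    rw [hstep, ih, List.filter_singleton]
    by_cases hb : pvBad seqs rl n <;> simp [hb]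

lemma pv_B_snd (cs0 : PySem.Dict Int Int) (seqs : List String) (rl : List Char) (n : Nat) :
    ((List.range n).foldl
      (fun (st : PySem.Dict Int Int × List Char) i =>
        let d := if pvBad seqs rl i then st.1.erase (i : Int) else st.1
        (d, st.2 ++ [if d.contains (i : Int) then '-' else rl.getD i ' ']))
      (cs0, [])).2
    = (List.range n).map
        (fun (i : Nat) => if cs0.contains (i : Int) && !pvBad seqs rl i then '-' else rl.getD i ' ') := by
  induction n with
  | zero => simp
  | succ n ih =>
    rw [List.range_succ, List.foldl_append, List.map_append]
    have hstep : ∀ (P : PySem.Dict Int Int × List Char),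
        ([n].foldl
          (fun (st : PySem.Dict Int Int × List Char) i =>
            let d := if pvBad seqs rl i then st.1.erase (i : Int) else st.1
            (d, st.2 ++ [if d.contains (i : Int) then '-' else rl.getD i ' '])) P).2
        = P.2 ++ [if (if pvBad seqs rl n then P.1.erase (n : Int) else P.1).contains (n : Int)
                    then '-' else rl.getD n ' '] := fun P => rfl
    rw [hstep, ih]
    congr 1
    have hfst := pv_B_fst cs0 seqs rl n
    by_cases hb : pvBad seqs rl n
    · rw [if_pos hb]
      simp [pv_contains_erase_self, hb]
    · rw [if_neg hb, hfst, pv_contains_foldl_eraseN]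
      have hall : ((List.range n).filter (pvBad seqs rl)).all
          (fun x => (n : Int) != (x : Int)) = true := by
        simp only [List.all_eq_true, List.mem_filter, List.mem_range]
        rintro x ⟨hx, _⟩
        simp only [bne_iff_ne, ne_eq, Int.natCast_inj]
        omega
      simp [hall, hb]

lemma pv_all_eq (seqs : List String) (rl : List Char) (y : Int) :
    (seqs.foldl
      (fun s f => PySem.Set.update s (PySem.Set.ofList
        (((PySem.List.enumerate (List.zip rl f.toList) 0).filter
            (fun p => p.2.1 != p.2.2)).map (fun p => p.1))))
      PySem.Set.empty).all (fun x => y != x)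
    = ((List.range rl.length).filter (pvBad seqs rl)).all (fun x => y != (x : Int)) := by
  apply Bool.coe_iff_coe.mp
  simp only [List.all_eq_true, List.mem_filter, List.mem_range]
  constructor
  · intro H x hx
    exact H _ ((pv_mem_diff_sites seqs rl _).mpr ⟨x, hx.1, hx.2, rfl⟩)
  · intro H x hx
    rcases (pv_mem_diff_sites seqs rl x).mp hx with ⟨j, hj, hbj, rfl⟩
    exact H j ⟨hj, hbj⟩

lemma pv_filter_all (seqs : List String) (rl : List Char) (i : Nat) (hi : i < rl.length) :
    ((List.range rl.length).filter (pvBad seqs rl)).all (fun x => (i : Int) != (x : Int))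
      = !pvBad seqs rl i := by
  cases hb : pvBad seqs rl i
  · simp only [Bool.not_false, List.all_eq_true, List.mem_filter, List.mem_range]
    rintro x ⟨hx, hbx⟩
    simp only [bne_iff_ne, ne_eq, Int.natCast_inj]
    rintro rfl
    rw [hb] at hbx
    exact Bool.false_ne_true hbx
  · simp only [Bool.not_true]
    refine List.all_eq_false.mpr ⟨i, List.mem_filter.mpr ⟨List.mem_range.mpr hi, hb⟩, by simp⟩

-- ===== VERDICT (by name: the statement is the Claim_ definition above) =====
theorem prep_ref_conserved_spec : Claim_equal_prep_ref_conserved := by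
  intro fv ref cs _dom _pre
  unfold Spec_prep_ref_conserved
  simp only [prep_ref_conserved, prep_ref_conserved_alt]
  rw [show (fun (st : PySem.Dict Int Int × List Char) (i : Nat) =>
        let d := if ((PySem.Dict.mk fv).values).any
            (fun f => decide (i < f.toList.length) && (f.toList[i]? != ref.toList[i]?))
          then st.1.erase (i : Int) else st.1
        (d, st.2 ++ [if d.contains (i : Int) then '-' else ref.toList.getD i ' ']))
      = (fun (st : PySem.Dict Int Int × List Char) (i : Nat) =>
        let d := if pvBad ((PySem.Dict.mk fv).values) ref.toList i then st.1.erase (i : Int) else st.1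
        (d, st.2 ++ [if d.contains (i : Int) then '-' else ref.toList.getD i ' '])) from rfl]
  rw [pv_B_fst, pv_B_snd]
  refine Prod.ext ?_ ?_
  · dsimp only
    apply congrArg
    apply List.ext_getElem
    · simp [PySem.List.length_enumerate]
    · intro i h1 h2
      have hi : i < ref.toList.length := by simpa using h2
      simp only [List.getElem_map, PySem.List.getElem_enumerate, List.getElem_range, zero_add]
      rw [pv_contains_foldl_erase, pv_all_eq, pv_filter_all _ _ _ hi,
          List.getD_eq_getElem?_getD, List.getElem?_eq_getElem hi]
      rfl
  · dsimp only
    rw [pv_foldl_erase_items, pv_foldl_eraseN_items]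
    exact List.filter_congr (fun p _ => pv_all_eq _ _ p.1)
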